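-- pv_equiv track=rewrite | github.com/adelinarf/Tarea5 | primos.py | tamanos
-- ===== SOURCE A (Python) =====
-- from math import sqrt,floor,ceil
-- import copy
--
-- def es_primo(n):
-- 	primo = 0
-- 	if n<=1:
-- 		return False
-- 	if(n > 1):
-- 		for i in range(2, int(sqrt(n)) + 1):
-- 			if (n % i == 0):
-- 				primo = 1
-- 				break
-- 		if (primo == 0):
-- 			return True
-- 		else:
-- 			return False
-- 	else:
-- 		return False
--
-- def tamanos(C):
-- 	Z = [[]]*len(C)
-- 	for x in range(len(C)):
-- 		actual = []
-- 		for y in range(len(C)):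
-- 			if C[x]==C[y]:
-- 				continue
-- 			else:
-- 				if es_primo(C[x]+C[y]):
-- 					actual.append(copy.deepcopy(C[y]))
-- 		Z[x] = actual
-- 	izquierda = []
-- 	derecha = []
-- 	for x in range(len(C)):
-- 		actual = x+1
-- 		if len(izquierda)==0 and len(derecha)==0:
-- 			izquierda.append(actual)
-- 			derecha += Z[x]
-- 		else:
-- 			if actual in set(izquierda):
-- 				derecha += Z[x]
-- 			if actual in set(derecha):
-- 				izquierda += Z[x]
--
-- 	n1 = len(set(izquierda))
-- 	n2 = len(set(derecha))
-- 	return [n1,n2]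
-- ===== SOURCE B (Python) =====
-- from math import isqrt
--
--
-- def tamanos(C):
--     n = len(C)
--     if n == 0:
--         return [0, 0]
--     mx = max(C)
--     limit = 2 * mx if mx > 0 else 1
--     # sieve of Eratosthenes up to isqrt(limit): prime table for trial division
--     r = isqrt(limit)
--     comp = [False] * (r + 1)
--     for i in range(2, isqrt(r) + 1):
--         for j in range(i * i, r + 1, i):
--             comp[j] = True
--     primes = [p for p in range(2, r + 1) if not comp[p]]
--
--     def isp(s):
--         if s < 2:
--             return False
--         for p in primes:
--             if p * p > s:
--                 return True
--             if s % p == 0: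
--                 return False
--         return True
--
--     vals = sorted(set(C))
--     nb = {v: [w for w in vals if w != v and isp(v + w)] for v in vals}
--
--     # pass 1: which rows get merged where; membership of the only queried
--     # integers 2..n is tracked in boolean tables instead of growing sets
--     inL = [False] * (n + 2)
--     inR = [False] * (n + 2)
--     mergeL = [False] * n
--     mergeR = [False] * n
--
--     def mark(table, ws):
--         for w in ws:
--             if 2 <= w <= n:
--                 table[w] = True
--
--     mergeR[0] = True
--     mark(inR, nb[C[0]])
--     for x in range(1, n):
--         if inL[x + 1]:
--             mergeR[x] = True
--             mark(inR, nb[C[x]])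
--         if inR[x + 1]:
--             mergeL[x] = True
--             mark(inL, nb[C[x]])
--
--     # pass 2: count the distinct elements of the merged unions
--     left = {1}
--     right = set()
--     for x in range(n):
--         if mergeL[x]:
--             left.update(nb[C[x]])
--         if mergeR[x]:
--             right.update(nb[C[x]])
--     return [len(left), len(right)]
-- ===== Notes on version B (the rewrite author's own statement) =====
-- stated objective: faster
-- what changed: B tests pair-sum primality by trial division against a prime table built once with a sieve of Eratosthenes up to isqrt(2*max) (early p*p > s stop), over distinct values only, and replaces A's growing izquierda/derecha lists (with a set() rebuilt from each list on every iteration and per-element deepcopy) by a staged pass: boolean tables over the only queried integers 2..n record which neighbour rows merge where, and a final pass counts the distinct elements of the merged unions.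
import Mathlib
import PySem

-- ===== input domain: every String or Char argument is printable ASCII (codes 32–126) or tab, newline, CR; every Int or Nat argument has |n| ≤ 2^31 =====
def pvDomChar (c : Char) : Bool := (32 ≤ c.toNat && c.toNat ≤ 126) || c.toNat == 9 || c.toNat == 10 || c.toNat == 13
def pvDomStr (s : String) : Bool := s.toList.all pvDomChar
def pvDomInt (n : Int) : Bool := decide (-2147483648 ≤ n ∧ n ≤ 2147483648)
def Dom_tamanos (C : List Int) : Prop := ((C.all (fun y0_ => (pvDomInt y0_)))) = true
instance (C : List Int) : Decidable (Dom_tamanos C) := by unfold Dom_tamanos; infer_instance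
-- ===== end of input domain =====

-- B replaces A's per-pair divide-by-every-integer primality test by a sieve-built prime table
-- (trial division by primes only, with an early p*p > s stop) over the distinct values, and
-- replaces A's growing izquierda/derecha lists (a set() rebuilt on every iteration) by a staged
-- computation: boolean tables over the only queried integers 2..n record which rows are merged
-- where, and a second pass counts the distinct elements of the merged unions.

-- ===== PORT A =====
-- es_primo: trial division 'for i in range(2, int(sqrt(n))+1)'; the loop+break+flag is the `any`.
-- int(sqrt(n)) = Nat.sqrt n.toNat exactly on the domain (|n| ≤ 2^32: float sqrt is correctly
-- rounded there; a possible one-larger bound adds a divisor candidate that never divides n).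
def es_primo (n : Int) : Bool :=
  if n ≤ 1 then false
  else if 1 < n then
    if (PySem.List.pyRange 2 ((Nat.sqrt n.toNat : Int) + 1) 1).any
        (fun i => PySem.Int.mod n i == 0) then false else true
  else false

-- inner loop of A's first pass: actual = [C[y] for in-range y …]; copy.deepcopy on an int is the
-- identity; C[x]/C[y] with x,y in range(len(C)) is exactly C.getD.
def zrow (C : List Int) (x : Nat) : List Int :=
  (List.range C.length).foldl
    (fun actual y =>
      if C.getD x 0 == C.getD y 0 then actual
      else if es_primo (C.getD x 0 + C.getD y 0) then actual ++ [C.getD y 0]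
      else actual) []

def tamanos (C : List Int) : List Int :=
  let n := C.length
  let Z := (List.range n).foldl (fun Z x => Z.set x (zrow C x)) (List.replicate n ([] : List Int))
  let s := (List.range n).foldl
    (fun (s : List Int × List Int) (x : Nat) =>
      let actual : Int := (x : Int) + 1
      if s.1.length = 0 ∧ s.2.length = 0 then
        (s.1 ++ [actual], s.2 ++ Z.getD x [])
      else
        let de := if PySem.Set.contains (PySem.Set.ofList s.1) actual then s.2 ++ Z.getD x [] else s.2
        let iz := if PySem.Set.contains (PySem.Set.ofList de) actual then s.1 ++ Z.getD x [] else s.1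
        (iz, de)) (([] : List Int), ([] : List Int))
  [((PySem.Set.ofList s.1).length : Int), ((PySem.Set.ofList s.2).length : Int)]

-- ===== PORT B =====
-- sieve of Eratosthenes up to r = isqrt(limit); math.isqrt = Nat.sqrt exactly (both arguments
-- here are nonnegative).  comp[j] = True for j in range(i*i, r+1, i).
-- the comp table is a Python list updated by index assignment: ported as Array (index in
-- range by construction, so setIfInBounds is exact)
def sieveComp (r : Int) : Array Bool :=
  (PySem.List.pyRange 2 ((Nat.sqrt r.toNat : Int) + 1) 1).foldl
    (fun comp i => (PySem.List.pyRange (i * i) (r + 1) i).foldl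
      (fun tb j => tb.setIfInBounds j.toNat true) comp)
    (Array.replicate (r.toNat + 1) false)

-- primes = [p for p in range(2, r+1) if not comp[p]]
def primeTable (r : Int) : List Int :=
  let comp := sieveComp r
  (PySem.List.pyRange 2 (r + 1) 1).filter (fun p => !(comp.getD p.toNat false))

-- the 'for p in primes' loop of isp, with its two early returns
def ispLoop (s : Int) : List Int → Bool
  | [] => true
  | p :: ps =>
    if s < p * p then true
    else if PySem.Int.mod s p == 0 then false
    else ispLoop s ps

def ispB (primes : List Int) (s : Int) : Bool :=
  if s < 2 then false else ispLoop s primes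

-- mark(table, ws): table[w] = True for the w already in 2..n
def markTable (n : Int) (tb : List Bool) (ws : List Int) : List Bool :=
  ws.foldl (fun tb w => if 2 ≤ w ∧ w ≤ n then tb.set w.toNat true else tb) tb

def tamanos_alt (C : List Int) : List Int :=
  let n := C.length
  if C.isEmpty then [0, 0]
  else
    let mx := (PySem.List.max? C (fun y => y)).getD 0
    let limit : Int := if 0 < mx then 2 * mx else 1
    let r : Int := (Nat.sqrt limit.toNat : Int)
    let primes := primeTable r
    let vals := PySem.List.sorted (PySem.Set.ofList C) (fun x => x) false
    let nb : PySem.Dict Int (List Int) :=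
      vals.foldl (fun d v =>
        d.insert v (vals.filter (fun w => w != v && ispB primes (v + w)))) PySem.Dict.empty
    let st := (PySem.List.pyRange 1 (n : Int) 1).foldl
      (fun (s : List Bool × List Bool × List Bool × List Bool) x =>
        let nbs := nb.getD (PySem.List.pyGetD C x 0) []
        let inR1 := if s.1.getD (x + 1).toNat false then markTable (n : Int) s.2.1 nbs else s.2.1
        let mergeR1 := if s.1.getD (x + 1).toNat false then s.2.2.2.set x.toNat true else s.2.2.2
        let inL1 := if inR1.getD (x + 1).toNat false then markTable (n : Int) s.1 nbs else s.1
        let mergeL1 := if inR1.getD (x + 1).toNat false then s.2.2.1.set x.toNat true else s.2.2.1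
        (inL1, inR1, mergeL1, mergeR1))
      (List.replicate (n + 2) false,
       markTable (n : Int) (List.replicate (n + 2) false) (nb.getD (PySem.List.pyGetD C 0 0) []),
       List.replicate n false,
       (List.replicate n false).set 0 true)
    let lr := (PySem.List.pyRange 0 (n : Int) 1).foldl
      (fun (lr : PySem.Set Int × PySem.Set Int) x =>
        let nbs := nb.getD (PySem.List.pyGetD C x 0) []
        (if st.2.2.1.getD x.toNat false then PySem.Set.update lr.1 nbs else lr.1,
         if st.2.2.2.getD x.toNat false then PySem.Set.update lr.2 nbs else lr.2))
      (PySem.Set.ofList [(1 : Int)], PySem.Set.empty)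
    [(lr.1.length : Int), (lr.2.length : Int)]

-- ===== PRECONDITION & SPEC =====
def Spec_tamanos (C : List Int) (out : List Int) : Prop := out = tamanos_alt C
instance (C : List Int) (out : List Int) : Decidable (Spec_tamanos C out) := by unfold Spec_tamanos; infer_instance

-- ===== CLAIM (what is proved, stated in full; the proofs are below) =====
def Claim_equal_tamanos : Prop := ∀ (C : List Int), Dom_tamanos C → Spec_tamanos C (tamanos C)

-- ===== LEMMAS AND PROOFS =====

lemma es_primo_iff (n : Int) (h2 : 2 ≤ n) :
    es_primo n = true ↔ ∀ i : Int, 2 ≤ i → i ≤ (Nat.sqrt n.toNat : Int) → ¬ i ∣ n := by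
  unfold es_primo
  rw [if_neg (by omega), if_pos (by omega)]
  by_cases h : (PySem.List.pyRange 2 ((Nat.sqrt n.toNat : Int) + 1) 1).any
      (fun i => PySem.Int.mod n i == 0)
  · rw [if_pos h]
    simp only [List.any_eq_true, PySem.List.mem_pyRange_one, beq_iff_eq,
      PySem.Int.mod_eq_zero_iff_dvd] at h
    obtain ⟨i, ⟨hi1, hi2⟩, hdvd⟩ := h
    constructor
    · intro hft; exact absurd hft (by simp)
    · intro hall; exact ((hall i hi1 (by omega) hdvd).elim)
  · rw [if_neg h]
    simp only [List.any_eq_true, PySem.List.mem_pyRange_one, beq_iff_eq,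
      PySem.Int.mod_eq_zero_iff_dvd, not_exists, not_and] at h
    constructor
    · intro _ i hi1 hi2 hdvd
      exact h i ⟨hi1, by omega⟩ hdvd
    · intro _; rfl

-- i*i ≤ s ↔ i ≤ isqrt(s), over Int with nonneg arguments
lemma sq_le_iff_le_sqrt (s i : Int) (h0 : 0 ≤ i) (hs : 0 ≤ s) :
    i * i ≤ s ↔ i ≤ (Nat.sqrt s.toNat : Int) := by
  constructor
  · intro h
    have h1 : i.toNat * i.toNat ≤ s.toNat := by
      have : ((i.toNat * i.toNat : Nat) : Int) ≤ ((s.toNat : Nat) : Int) := by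
        push_cast
        rw [Int.toNat_of_nonneg h0, Int.toNat_of_nonneg hs]
        exact h
      exact_mod_cast this
    have := Nat.le_sqrt.mpr h1
    omega
  · intro h
    have h1 : i.toNat ≤ Nat.sqrt s.toNat := by omega
    have h2 : i.toNat * i.toNat ≤ s.toNat := Nat.le_sqrt.mp h1
    calc i * i = ((i.toNat * i.toNat : Nat) : Int) := by
          push_cast; rw [Int.toNat_of_nonneg h0]
      _ ≤ ((s.toNat : Nat) : Int) := by exact_mod_cast h2
      _ = s := Int.toNat_of_nonneg hs

lemma int_dvd_iff_toNat (i s : Int) (h0 : 0 ≤ i) (hs : 0 ≤ s) :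
    i ∣ s ↔ i.toNat ∣ s.toNat := by
  rw [← Int.natCast_dvd_natCast, Int.toNat_of_nonneg h0, Int.toNat_of_nonneg hs]

-- "no divisor i with 2 ≤ i and i² ≤ s" IS primality of s.toNat
lemma int_trial_iff_prime (s : Int) (h2 : 2 ≤ s) :
    (∀ i : Int, 2 ≤ i → i * i ≤ s → ¬ i ∣ s) ↔ s.toNat.Prime := by
  rw [Nat.prime_def_le_sqrt]
  constructor
  · intro h
    refine ⟨by omega, ?_⟩
    intro m hm hms hdvd
    have hmm : (m : Int) * (m : Int) ≤ s := by
      have := Nat.le_sqrt.mp hms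
      calc (m : Int) * (m : Int) = ((m * m : Nat) : Int) := by push_cast; ring
        _ ≤ ((s.toNat : Nat) : Int) := by exact_mod_cast this
        _ = s := Int.toNat_of_nonneg (by omega)
    exact h m (by exact_mod_cast hm) hmm
      ((int_dvd_iff_toNat m s (by omega) (by omega)).mpr (by simpa using hdvd))
  · rintro ⟨-, h⟩ i hi hsq hdvd
    have h1 : i.toNat ≤ Nat.sqrt s.toNat := by
      have := (sq_le_iff_le_sqrt s i (by omega) (by omega)).mp hsq
      omega
    exact h i.toNat (by omega) h1 ((int_dvd_iff_toNat i s (by omega) (by omega)).mp hdvd)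

lemma es_primo_prime (s : Int) (h2 : 2 ≤ s) :
    es_primo s = true ↔ s.toNat.Prime := by
  rw [es_primo_iff s h2, ← int_trial_iff_prime s h2]
  constructor
  · intro h i hi hsq
    exact h i hi ((sq_le_iff_le_sqrt s i (by omega) (by omega)).mp hsq)
  · intro h i hi hle
    exact h i hi ((sq_le_iff_le_sqrt s i (by omega) (by omega)).mpr hle)

-- marking folds: length preserved, entries characterised
lemma size_setfold (js : List Int) (L : Array Bool) :
    (js.foldl (fun tb j => tb.setIfInBounds j.toNat true) L).size = L.size := by
  induction js generalizing L with
  | nil => rfl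
  | cons j js ih => rw [List.foldl_cons, ih]; exact Array.size_setIfInBounds

lemma getD_setfold (js : List Int) (L : Array Bool) (k : Nat) (hk : k < L.size) :
    (js.foldl (fun tb j => tb.setIfInBounds j.toNat true) L).getD k false
      = (L.getD k false || js.any (fun j => j.toNat == k)) := by
  induction js generalizing L with
  | nil => simp
  | cons j js ih =>
    rw [List.foldl_cons, ih _ (by rw [Array.size_setIfInBounds]; exact hk), List.any_cons]
    by_cases h : j.toNat = k
    · subst h
      simp [Array.getD_eq_getD_getElem?, hk]
    · have hb : (j.toNat == k) = false := beq_eq_false_iff_ne.mpr h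
      simp [Array.getD_eq_getD_getElem?, h, hb]

lemma length_markTable (n : Int) (tb : List Bool) (ws : List Int) :
    (markTable n tb ws).length = tb.length := by
  unfold markTable
  induction ws generalizing tb with
  | nil => rfl
  | cons w ws ih =>
    rw [List.foldl_cons]
    by_cases h : 2 ≤ w ∧ w ≤ n
    · rw [if_pos h, ih]; exact List.length_set ..
    · rw [if_neg h, ih]

lemma getD_markTable (n : Int) (ws : List Int) (tb : List Bool) (t : Nat)
    (h2 : 2 ≤ t) (hn : (t : Int) ≤ n) (hlen : t < tb.length) :
    (markTable n tb ws).getD t false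
      = (tb.getD t false || ws.any (fun w => w == (t : Int))) := by
  unfold markTable
  induction ws generalizing tb with
  | nil => simp
  | cons w ws ih =>
    rw [List.foldl_cons, List.any_cons]
    by_cases h : 2 ≤ w ∧ w ≤ n
    · rw [if_pos h, ih _ (by rw [List.length_set]; exact hlen)]
      by_cases hw : w = (t : Int)
      · have hwt : w.toNat = t := by omega
        have hget : (tb.set w.toNat true).getD t false = true := by
          rw [hwt]
          simp [List.getD_eq_getElem?_getD, List.getElem?_set_self hlen]
        have hb : (w == (t : Int)) = true := by simpa using hw
        rw [hget, hb]
        simp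
      · have hne : w.toNat ≠ t := by omega
        have hget : (tb.set w.toNat true).getD t false = tb.getD t false := by
          simp [List.getD_eq_getElem?_getD, List.getElem?_set_ne hne]
        have hb : (w == (t : Int)) = false := beq_eq_false_iff_ne.mpr hw
        rw [hget, hb]
        simp
    · rw [if_neg h, ih _ hlen]
      have hb : (w == (t : Int)) = false :=
        beq_eq_false_iff_ne.mpr (by intro he; exact h (by omega))
      rw [hb]
      simp

-- outer sieve fold
lemma getD_sieve_outer (is : List Int) (g : Int → List Int) (L : Array Bool) (k : Nat)
    (hk : k < L.size) :
    ((is.foldl (fun comp i => (g i).foldl (fun tb j => tb.setIfInBounds j.toNat true) comp) L).getD k false)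
      = (L.getD k false || is.any (fun i => (g i).any (fun j => j.toNat == k))) := by
  induction is generalizing L with
  | nil => simp
  | cons i is ih =>
    rw [List.foldl_cons, ih _ (by rw [size_setfold]; exact hk), List.any_cons,
      getD_setfold _ _ _ hk, Bool.or_assoc]

lemma comp_char (r : Int) (k : Int) (h2 : 2 ≤ k) (hk : k ≤ r) :
    ((sieveComp r).getD k.toNat false = true) ↔ ∃ i : Int, 2 ≤ i ∧ i * i ≤ k ∧ i ∣ k := by
  unfold sieveComp
  rw [getD_sieve_outer _ _ _ _ (by rw [Array.size_replicate]; omega)]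
  have hrep : (Array.replicate (r.toNat + 1) false).getD k.toNat false = false := by
    rw [Array.getD_eq_getD_getElem?, Array.getElem?_replicate]
    split <;> rfl
  rw [hrep, Bool.false_or, List.any_eq_true]
  constructor
  · rintro ⟨i, hi, hji⟩
    rw [List.any_eq_true] at hji
    obtain ⟨j, hj, hjk⟩ := hji
    rw [PySem.List.mem_pyRange_one] at hi
    have hipos : (0 : Int) < i := by omega
    rw [PySem.List.mem_pyRange_iff_of_pos hipos] at hj
    have hj0 : 0 ≤ j := by nlinarith [hj.1]
    have hjeq : j = k := by
      have : j.toNat = k.toNat := by simpa using hjk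
      omega
    subst hjeq
    refine ⟨i, by omega, hj.1, ?_⟩
    have hii : i ∣ i * i := Dvd.intro i rfl
    have := dvd_add hj.2.2 hii
    simpa using this
  · rintro ⟨i, hi2, hisq, hidvd⟩
    have hir : i ≤ (Nat.sqrt r.toNat : Int) := by
      have := (sq_le_iff_le_sqrt r i (by omega) (by omega)).mp (le_trans hisq hk)
      exact this
    refine ⟨i, ?_, ?_⟩
    · rw [PySem.List.mem_pyRange_one]; omega
    · rw [List.any_eq_true]
      refine ⟨k, ?_, by simp⟩
      rw [PySem.List.mem_pyRange_iff_of_pos (by omega : (0:Int) < i)]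
      refine ⟨hisq, by omega, ?_⟩
      exact dvd_sub hidvd (Dvd.intro i rfl)

lemma mem_primeTable (r : Int) (p : Int) :
    p ∈ primeTable r ↔ 2 ≤ p ∧ p ≤ r ∧ p.toNat.Prime := by
  show p ∈ (PySem.List.pyRange 2 (r + 1) 1).filter
    (fun p => !((sieveComp r).getD p.toNat false)) ↔ _
  rw [List.mem_filter]
  constructor
  · rintro ⟨hmem, hval⟩
    rw [PySem.List.mem_pyRange_one] at hmem
    have h2 : 2 ≤ p := hmem.1
    have hr : p ≤ r := by omega
    refine ⟨h2, hr, ?_⟩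
    rw [← int_trial_iff_prime p h2]
    intro i hi hsq hdvd
    have htrue : (sieveComp r).getD p.toNat false = true :=
      (comp_char r p h2 hr).mpr ⟨i, hi, hsq, hdvd⟩
    simp only [Bool.not_eq_true'] at hval
    rw [htrue] at hval
    exact absurd hval (by simp)
  · rintro ⟨h2, hr, hprime⟩
    refine ⟨by rw [PySem.List.mem_pyRange_one]; omega, ?_⟩
    have hfalse : (sieveComp r).getD p.toNat false = false := by
      rw [Bool.eq_false_iff, Ne, comp_char r p h2 hr]
      rintro ⟨i, hi, hsq, hdvd⟩
      exact (int_trial_iff_prime p h2).mpr hprime i hi hsq hdvd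
    show (!((sieveComp r).getD p.toNat false)) = true
    rw [hfalse]
    rfl

lemma pairwise_primeTable (r : Int) : (primeTable r).Pairwise (· < ·) := by
  show ((PySem.List.pyRange 2 (r + 1) 1).filter
    (fun p => !((sieveComp r).getD p.toNat false))).Pairwise (· < ·)
  exact (PySem.List.pairwise_lt_pyRange_one 2 (r + 1)).filter _

lemma ispLoop_false_iff (s : Int) (ps : List Int)
    (h2 : ∀ p ∈ ps, 2 ≤ p) (hsort : ps.Pairwise (· < ·)) :
    ispLoop s ps = false ↔ ∃ p ∈ ps, p ∣ s ∧ p * p ≤ s := by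
  induction ps with
  | nil => simp [ispLoop]
  | cons p ps ih =>
    have hp2 : 2 ≤ p := h2 p (List.mem_cons_self ..)
    rw [ispLoop]
    by_cases hbr : s < p * p
    · rw [if_pos hbr]
      constructor
      · intro h; exact absurd h (by simp)
      · rintro ⟨q, hq, -, hqs⟩
        rcases List.mem_cons.mp hq with rfl | hmem
        · linarith
        · have hpq : p < q := (List.pairwise_cons.mp hsort).1 q hmem
          have h2q : 2 ≤ q := h2 q (List.mem_cons_of_mem _ hmem)
          nlinarith
    · rw [if_neg hbr]
      by_cases hdvd : PySem.Int.mod s p == 0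
      · rw [if_pos hdvd]
        simp only [beq_iff_eq, PySem.Int.mod_eq_zero_iff_dvd] at hdvd
        constructor
        · intro _; exact ⟨p, List.mem_cons_self .., hdvd, by omega⟩
        · intro _; rfl
      · rw [if_neg hdvd]
        rw [ih (fun q hq => h2 q (List.mem_cons_of_mem _ hq)) (List.Pairwise.of_cons hsort)]
        simp only [beq_iff_eq, PySem.Int.mod_eq_zero_iff_dvd] at hdvd
        constructor
        · rintro ⟨q, hq, hqd, hqs⟩
          exact ⟨q, List.mem_cons_of_mem _ hq, hqd, hqs⟩
        · rintro ⟨q, hq, hqd, hqs⟩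
          rcases List.mem_cons.mp hq with h | h
          · exact absurd (h ▸ hqd) hdvd
          · exact ⟨q, h, hqd, hqs⟩

lemma ispB_eq (limit : Int) (hlim : 1 ≤ limit) (s : Int) (hs : s ≤ limit) :
    ispB (primeTable (Nat.sqrt limit.toNat : Int)) s = es_primo s := by
  set r : Int := (Nat.sqrt limit.toNat : Int) with hr
  by_cases h2 : s < 2
  · unfold ispB es_primo
    rw [if_pos h2, if_pos (by omega)]
  · have h2 : 2 ≤ s := by omega
    have hA : es_primo s = true ↔ s.toNat.Prime := es_primo_prime s h2
    have hloop := ispLoop_false_iff s (primeTable r)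
      (fun p hp => ((mem_primeTable r p).mp hp).1) (pairwise_primeTable r)
    have hB : ispB (primeTable r) s = ispLoop s (primeTable r) := by
      unfold ispB; rw [if_neg (by omega)]
    have key : ispLoop s (primeTable r) = false ↔ ¬ s.toNat.Prime := by
      rw [hloop]
      constructor
      · rintro ⟨p, hp, hdvd, hsq⟩ hprime
        obtain ⟨hp2, hpr, hpprime⟩ := (mem_primeTable r p).mp hp
        have hdn : p.toNat ∣ s.toNat := (int_dvd_iff_toNat p s (by omega) (by omega)).mp hdvd
        rcases Nat.Prime.eq_one_or_self_of_dvd hprime p.toNat hdn with h | h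
        · omega
        · have hps : p = s := by omega
          nlinarith
      · intro hnp
        have hqprime : s.toNat.minFac.Prime := Nat.minFac_prime (by omega)
        have hqdvd : s.toNat.minFac ∣ s.toNat := Nat.minFac_dvd _
        have hqsq : s.toNat.minFac * s.toNat.minFac ≤ s.toNat := by
          have h := Nat.minFac_sq_le_self (by omega : 0 < s.toNat) hnp
          rwa [pow_two] at h
        refine ⟨(s.toNat.minFac : Int), ?_, ?_, ?_⟩
        · rw [mem_primeTable]
          refine ⟨by exact_mod_cast hqprime.two_le, ?_, by simpa using hqprime⟩
          have h1 : s.toNat.minFac ≤ Nat.sqrt s.toNat := Nat.le_sqrt.mpr hqsq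
          have h2' : Nat.sqrt s.toNat ≤ Nat.sqrt limit.toNat :=
            Nat.sqrt_le_sqrt (by omega)
          rw [hr]; exact_mod_cast le_trans h1 h2'
        · rw [int_dvd_iff_toNat _ _ (Int.natCast_nonneg _) (by omega)]
          simpa using hqdvd
        · calc ((s.toNat.minFac : Int)) * (s.toNat.minFac : Int)
              = ((s.toNat.minFac * s.toNat.minFac : Nat) : Int) := by push_cast; ring
            _ ≤ ((s.toNat : Nat) : Int) := by exact_mod_cast hqsq
            _ = s := Int.toNat_of_nonneg (by omega)
    rw [hB]
    by_cases hp : s.toNat.Prime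
    · have e1 : es_primo s = true := hA.mpr hp
      have e2 : ispLoop s (primeTable r) = true := by
        cases hq : ispLoop s (primeTable r)
        · exact absurd (key.mp hq) (not_not_intro hp)
        · rfl
      rw [e1, e2]
    · have e1 : es_primo s = false := by
        rw [Bool.eq_false_iff, Ne, hA]; exact hp
      rw [e1, key.mpr hp]

-- A's first loop writes row x into the preallocated Z; the fold is the prefix map.
lemma foldl_set_range {α : Type} (f : Nat → α) :
    ∀ (k : Nat) (L : List α), k ≤ L.length →
      (List.range k).foldl (fun Z x => Z.set x (f x)) L = (List.range k).map f ++ L.drop k := by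
  intro k
  induction k with
  | zero => simp
  | succ k ih =>
    intro L hk
    rw [List.range_succ, List.foldl_append, ih L (by omega)]
    simp only [List.foldl_cons, List.foldl_nil, List.set_append, List.length_map,
      List.length_range, lt_irrefl, Nat.sub_self, if_false]
    have hd : List.drop k L = L[k] :: List.drop (k+1) L :=
      (List.getElem_cons_drop (by omega)).symm
    rw [hd]
    simp only [List.map_append, List.map_cons, List.map_nil, List.set_cons_zero,
      List.append_assoc, List.cons_append, List.nil_append]

lemma mem_zrow (C : List Int) (x : Nat) (a : Int) :
    a ∈ zrow C x ↔ a ∈ C ∧ a ≠ C.getD x 0 ∧ es_primo (C.getD x 0 + a) = true := by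
  unfold zrow
  have hstep : (fun (actual : List Int) (y : Nat) =>
      if C.getD x 0 == C.getD y 0 then actual
      else if es_primo (C.getD x 0 + C.getD y 0) then actual ++ [C.getD y 0] else actual)
      = fun (actual : List Int) (y : Nat) =>
        if !(C.getD x 0 == C.getD y 0) && es_primo (C.getD x 0 + C.getD y 0)
        then actual ++ [C.getD y 0] else actual := by
    funext acc y
    by_cases hq : C.getD x 0 == C.getD y 0 <;>
      by_cases hp : es_primo (C.getD x 0 + C.getD y 0) <;>
        simp [hq, hp, -List.getD_eq_getElem?_getD]
  rw [hstep, PySem.List.foldl_append_if]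
  simp only [List.nil_append, List.mem_map, List.mem_filter, List.mem_range, Bool.and_eq_true,
    Bool.not_eq_eq_eq_not, Bool.not_true, beq_eq_false_iff_ne, ne_eq]
  constructor
  · rintro ⟨y, ⟨hy, hne, hp⟩, rfl⟩
    refine ⟨?_, fun h => hne h.symm, hp⟩
    rw [List.getD_eq_getElem _ _ hy]
    exact List.getElem_mem hy
  · rintro ⟨ha, hne, hp⟩
    obtain ⟨y, hy, hya⟩ := List.mem_iff_getElem.mp ha
    refine ⟨y, ⟨hy, ?_, ?_⟩, ?_⟩ <;> rw [List.getD_eq_getElem _ _ hy, hya]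
    · exact fun h => hne h.symm
    · exact hp

lemma getD_fold_not_mem (f : Int → List Int) (t : List Int) (d : PySem.Dict Int (List Int))
    (v : Int) (hv : v ∉ t) :
    (t.foldl (fun d w => d.insert w (f w)) d).getD v [] = d.getD v [] := by
  induction t generalizing d with
  | nil => rfl
  | cons w t ih =>
    simp only [List.mem_cons, not_or] at hv
    rw [List.foldl_cons, ih _ hv.2, PySem.Dict.getD_insert, if_neg hv.1]

lemma getD_fold_mem (f : Int → List Int) (t : List Int) (d : PySem.Dict Int (List Int))
    (v : Int) (hv : v ∈ t) :
    (t.foldl (fun d w => d.insert w (f w)) d).getD v [] = f v := by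
  induction t generalizing d with
  | nil => cases hv
  | cons w t ih =>
    rw [List.foldl_cons]
    by_cases h : v ∈ t
    · exact ih _ h
    · have hvw : v = w := by
        rcases List.mem_cons.mp hv with h' | h'
        · exact h'
        · exact absurd h' h
      rw [getD_fold_not_mem f t _ v h, PySem.Dict.getD_insert, if_pos hvw, hvw]

lemma ofList_length_eq {l s : List Int} (h : ∀ t, t ∈ l ↔ t ∈ s) (hs : s.Nodup) :
    (PySem.Set.ofList l).length = s.length :=
  ((List.perm_ext_iff_of_nodup (PySem.Set.nodup_ofList l) hs).mpr
    (fun a => by rw [PySem.Set.mem_ofList]; exact h a)).length_eq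

lemma getD_set_flag (m : List Bool) (x y : Nat) (hy : y < m.length) :
    ((m.set x true).getD y false) = (decide (x = y) || m.getD y false) := by
  by_cases h : x = y
  · subst h
    simp [List.getD_eq_getElem?_getD, List.getElem?_set_self hy]
  · simp [List.getD_eq_getElem?_getD, List.getElem?_set_ne h, h]

lemma exists_set_flag (ZA : Nat → List Int) (m : List Bool) (n x : Nat) (hx : x < n)
    (hlen : m.length = n) (z : Int) :
    ((∃ y, y < n ∧ (m.set x true).getD y false = true ∧ z ∈ ZA y)
      ↔ ((∃ y, y < n ∧ m.getD y false = true ∧ z ∈ ZA y) ∨ z ∈ ZA x)) := by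
  constructor
  · rintro ⟨y, hy, hget, hz⟩
    by_cases h : x = y
    · subst h; exact Or.inr hz
    · left
      refine ⟨y, hy, ?_, hz⟩
      rwa [getD_set_flag _ _ _ (by omega), decide_eq_false h, Bool.false_or] at hget
  · rintro (⟨y, hy, hget, hz⟩ | hz)
    · refine ⟨y, hy, ?_, hz⟩
      rw [getD_set_flag _ _ _ (by omega), hget]
      simp
    · refine ⟨x, hx, ?_, hz⟩
      rw [getD_set_flag _ _ _ (by omega)]
      simp

-- the relation the two propagation passes preserve
def PRel (ZA : Nat → List Int) (n : Nat) (a : List Int × List Int)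
    (b : List Bool × List Bool × List Bool × List Bool) : Prop :=
  b.1.length = n + 2 ∧ b.2.1.length = n + 2 ∧ b.2.2.1.length = n ∧ b.2.2.2.length = n ∧
  (∀ t : Nat, 2 ≤ t → t ≤ n → (b.1.getD t false = true ↔ ((t : Int) ∈ a.1))) ∧
  (∀ t : Nat, 2 ≤ t → t ≤ n → (b.2.1.getD t false = true ↔ ((t : Int) ∈ a.2))) ∧
  (∀ z : Int, z ∈ a.1 ↔ z = 1 ∨ ∃ y, y < n ∧ b.2.2.1.getD y false = true ∧ z ∈ ZA y) ∧
  (∀ z : Int, z ∈ a.2 ↔ ∃ y, y < n ∧ b.2.2.2.getD y false = true ∧ z ∈ ZA y)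

lemma any_beq_iff_mem (ws : List Int) (t : Int) :
    (ws.any (fun w => w == t) = true) ↔ t ∈ ws := by
  rw [List.any_eq_true]
  constructor
  · rintro ⟨w, hw, hb⟩
    rwa [show w = t from by simpa using hb] at hw
  · intro h; exact ⟨t, h, by simp⟩

lemma loop_rel2 (ZA : Nat → List Int) (NB : Int → List Int) (nI : Int) (n : Nat)
    (hnI : nI = (n : Int))
    (hrow : ∀ x : Nat, x < n → (∀ t, t ∈ ZA x ↔ t ∈ NB (x : Int)) ∧ (NB (x : Int)).Nodup) :
    ∀ (k u : Nat) (v : Int), 1 ≤ u → u + k ≤ n → v = ((u + k : Nat) : Int) →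
      ∀ (a : List Int × List Int) (b : List Bool × List Bool × List Bool × List Bool),
      PRel ZA n a b →
      PRel ZA n
        ((List.range' u k).foldl
          (fun (s : List Int × List Int) (x : Nat) =>
            let actual : Int := (x : Int) + 1
            if s.1.length = 0 ∧ s.2.length = 0 then
              (s.1 ++ [actual], s.2 ++ ZA x)
            else
              let de := if PySem.Set.contains (PySem.Set.ofList s.1) actual then s.2 ++ ZA x else s.2
              let iz := if PySem.Set.contains (PySem.Set.ofList de) actual then s.1 ++ ZA x else s.1
              (iz, de)) a)
        ((PySem.List.pyRange (u : Int) v 1).foldl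
          (fun (s : List Bool × List Bool × List Bool × List Bool) x =>
            let nbs := NB x
            let inR1 := if s.1.getD (x + 1).toNat false then markTable nI s.2.1 nbs else s.2.1
            let mergeR1 := if s.1.getD (x + 1).toNat false then s.2.2.2.set x.toNat true else s.2.2.2
            let inL1 := if inR1.getD (x + 1).toNat false then markTable nI s.1 nbs else s.1
            let mergeL1 := if inR1.getD (x + 1).toNat false then s.2.2.1.set x.toNat true else s.2.2.1
            (inL1, inR1, mergeL1, mergeR1)) b) := by
  intro k
  induction k with
  | zero =>
    intro u v hu hun hv a b hrel
    rw [PySem.List.pyRange_one_eq_nil (by omega)]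
    exact hrel
  | succ k ih =>
    intro u v hu hun hv a b hrel
    obtain ⟨L1, L2, L3, L4, HL, HR, ML, MR⟩ := hrel
    rw [List.range'_succ, PySem.List.pyRange_one_cons (show (u : Int) < v by omega)]
    simp only [List.foldl_cons]
    have hone : (1 : Int) ∈ a.1 := (ML 1).mpr (Or.inl rfl)
    rw [if_neg (by
      rintro ⟨hlen, -⟩
      exact absurd hone (by simp [List.length_eq_zero_iff.mp hlen]))]
    have htn : (((u : Int)) + 1).toNat = u + 1 := by omega
    have hu1n : u < n := by omega
    have hrowu := hrow u hu1n
    -- first branch condition agrees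
    have hc1 : (b.1.getD ((u : Int) + 1).toNat false)
        = PySem.Set.contains (PySem.Set.ofList a.1) ((u : Int) + 1) := by
      rw [htn, Bool.eq_iff_iff, PySem.Set.contains_iff, PySem.Set.mem_ofList,
        HL (u + 1) (by omega) (by omega)]
      push_cast
      rfl
    set de := if PySem.Set.contains (PySem.Set.ofList a.1) ((u : Int) + 1)
      then a.2 ++ ZA u else a.2 with hde
    set inR1 := if b.1.getD ((u : Int) + 1).toNat false
      then markTable nI b.2.1 (NB (u : Int)) else b.2.1 with hinR1
    set mergeR1 := if b.1.getD ((u : Int) + 1).toNat false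
      then b.2.2.2.set ((u : Int)).toNat true else b.2.2.2 with hmergeR1
    have htu : ((u : Int)).toNat = u := by omega
    have L2' : inR1.length = n + 2 := by
      rw [hinR1]
      by_cases h : b.1.getD ((u : Int) + 1).toNat false
      · rw [if_pos h, length_markTable]; exact L2
      · rw [if_neg h]; exact L2
    have L4' : mergeR1.length = n := by
      rw [hmergeR1]
      by_cases h : b.1.getD ((u : Int) + 1).toNat false
      · rw [if_pos h, List.length_set]; exact L4
      · rw [if_neg h]; exact L4
    have HR' : ∀ t : Nat, 2 ≤ t → t ≤ n → (inR1.getD t false = true ↔ ((t : Int) ∈ de)) := by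
      intro t ht2 htn'
      rw [hinR1, hde, ← hc1]
      by_cases h : b.1.getD ((u : Int) + 1).toNat false
      · rw [if_pos h, if_pos h,
          getD_markTable nI _ _ t ht2 (by omega) (by omega),
          Bool.or_eq_true, List.mem_append, any_beq_iff_mem]
        exact or_congr (HR t ht2 htn') (Iff.symm ((hrowu.1 (t : Int))))
      · rw [if_neg h, if_neg h]
        exact HR t ht2 htn'
    have MR' : ∀ z : Int, z ∈ de ↔ ∃ y, y < n ∧ mergeR1.getD y false = true ∧ z ∈ ZA y := by
      intro z
      rw [hde, hmergeR1, ← hc1]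
      by_cases h : b.1.getD ((u : Int) + 1).toNat false
      · rw [if_pos h, if_pos h, List.mem_append, htu,
          exists_set_flag ZA _ n u hu1n L4 z]
        exact or_congr (MR z) Iff.rfl
      · rw [if_neg h, if_neg h]
        exact MR z
    -- second branch condition agrees
    have hc2 : (inR1.getD ((u : Int) + 1).toNat false)
        = PySem.Set.contains (PySem.Set.ofList de) ((u : Int) + 1) := by
      rw [htn, Bool.eq_iff_iff, PySem.Set.contains_iff, PySem.Set.mem_ofList,
        HR' (u + 1) (by omega) (by omega)]
      push_cast
      rfl
    set iz := if PySem.Set.contains (PySem.Set.ofList de) ((u : Int) + 1)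
      then a.1 ++ ZA u else a.1 with hiz
    set inL1 := if inR1.getD ((u : Int) + 1).toNat false
      then markTable nI b.1 (NB (u : Int)) else b.1 with hinL1
    set mergeL1 := if inR1.getD ((u : Int) + 1).toNat false
      then b.2.2.1.set ((u : Int)).toNat true else b.2.2.1 with hmergeL1
    have L1' : inL1.length = n + 2 := by
      rw [hinL1]
      by_cases h : inR1.getD ((u : Int) + 1).toNat false
      · rw [if_pos h, length_markTable]; exact L1
      · rw [if_neg h]; exact L1
    have L3' : mergeL1.length = n := by
      rw [hmergeL1]
      by_cases h : inR1.getD ((u : Int) + 1).toNat false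
      · rw [if_pos h, List.length_set]; exact L3
      · rw [if_neg h]; exact L3
    have HL' : ∀ t : Nat, 2 ≤ t → t ≤ n → (inL1.getD t false = true ↔ ((t : Int) ∈ iz)) := by
      intro t ht2 htn'
      rw [hinL1, hiz, ← hc2]
      by_cases h : inR1.getD ((u : Int) + 1).toNat false
      · rw [if_pos h, if_pos h,
          getD_markTable nI _ _ t ht2 (by omega) (by omega),
          Bool.or_eq_true, List.mem_append, any_beq_iff_mem]
        exact or_congr (HL t ht2 htn') (Iff.symm ((hrowu.1 (t : Int))))
      · rw [if_neg h, if_neg h]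
        exact HL t ht2 htn'
    have ML' : ∀ z : Int, z ∈ iz ↔ z = 1 ∨ ∃ y, y < n ∧ mergeL1.getD y false = true ∧ z ∈ ZA y := by
      intro z
      rw [hiz, hmergeL1, ← hc2]
      by_cases h : inR1.getD ((u : Int) + 1).toNat false
      · rw [if_pos h, if_pos h, List.mem_append, htu,
          exists_set_flag ZA _ n u hu1n L3 z, ML z]
        exact or_assoc
      · rw [if_neg h, if_neg h]
        exact ML z
    have hcast1 : ((u : Int)) + 1 = (((u + 1 : Nat)) : Int) := by push_cast; ring
    rw [hcast1]
    exact ih (u + 1) v (by omega) (by omega) (by omega) (iz, de) (inL1, inR1, mergeL1, mergeR1)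
      ⟨L1', L2', L3', L4', HL', HR', ML', MR'⟩

lemma mem_foldl_update_flag (idxs : List Int) (flag : Int → Bool) (rows : Int → List Int)
    (init : PySem.Set Int) (z : Int) :
    z ∈ idxs.foldl (fun s x => if flag x then PySem.Set.update s (rows x) else s) init
      ↔ z ∈ init ∨ ∃ x ∈ idxs, flag x = true ∧ z ∈ rows x := by
  induction idxs generalizing init with
  | nil => simp
  | cons x xs ih =>
    rw [List.foldl_cons]
    by_cases h : flag x
    · rw [if_pos h, ih]
      constructor
      · rintro (hz | ⟨y, hy, hf, hzz⟩)
        · rcases (PySem.Set.mem_update _ _ _).mp hz with h1 | h1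
          · exact Or.inl h1
          · exact Or.inr ⟨x, List.mem_cons_self .., h, h1⟩
        · exact Or.inr ⟨y, List.mem_cons_of_mem _ hy, hf, hzz⟩
      · rintro (hz | ⟨y, hy, hf, hzz⟩)
        · exact Or.inl ((PySem.Set.mem_update _ _ _).mpr (Or.inl hz))
        · rcases List.mem_cons.mp hy with rfl | hmem
          · exact Or.inl ((PySem.Set.mem_update _ _ _).mpr (Or.inr hzz))
          · exact Or.inr ⟨y, hmem, hf, hzz⟩
    · rw [if_neg h, ih]
      constructor
      · rintro (hz | ⟨y, hy, hf, hzz⟩)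
        · exact Or.inl hz
        · exact Or.inr ⟨y, List.mem_cons_of_mem _ hy, hf, hzz⟩
      · rintro (hz | ⟨y, hy, hf, hzz⟩)
        · exact Or.inl hz
        · rcases List.mem_cons.mp hy with rfl | hmem
          · exact absurd hf (by simpa using h)
          · exact Or.inr ⟨y, hmem, hf, hzz⟩

lemma nodup_foldl_update_flag (idxs : List Int) (flag : Int → Bool) (rows : Int → List Int)
    (init : PySem.Set Int) (hn : init.Nodup) :
    (idxs.foldl (fun s x => if flag x then PySem.Set.update s (rows x) else s) init).Nodup := by
  induction idxs generalizing init with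
  | nil => exact hn
  | cons x xs ih =>
    rw [List.foldl_cons]
    by_cases h : flag x
    · rw [if_pos h]; exact ih _ (PySem.Set.nodup_update _ _ hn)
    · rw [if_neg h]; exact ih _ hn


lemma final_eq (ZA : Nat → List Int) (NB : Int → List Int) (n : Nat)
    (hrowIff : ∀ x : Nat, x < n → ∀ t : Int, t ∈ ZA x ↔ t ∈ NB (x : Int))
    (a : List Int × List Int) (mergeL mergeR : List Bool)
    (HML : ∀ z : Int, z ∈ a.1 ↔ z = 1 ∨ ∃ y, y < n ∧ mergeL.getD y false = true ∧ z ∈ ZA y)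
    (HMR : ∀ z : Int, z ∈ a.2 ↔ ∃ y, y < n ∧ mergeR.getD y false = true ∧ z ∈ ZA y) :
    [((PySem.Set.ofList a.1).length : Int), ((PySem.Set.ofList a.2).length : Int)]
      = [((((PySem.List.pyRange 0 (n : Int) 1).foldl
            (fun (lr : PySem.Set Int × PySem.Set Int) x =>
              (if mergeL.getD x.toNat false then PySem.Set.update lr.1 (NB x) else lr.1,
               if mergeR.getD x.toNat false then PySem.Set.update lr.2 (NB x) else lr.2))
            (PySem.Set.ofList [(1 : Int)], PySem.Set.empty)).1.length : Nat) : Int),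
         ((((PySem.List.pyRange 0 (n : Int) 1).foldl
            (fun (lr : PySem.Set Int × PySem.Set Int) x =>
              (if mergeL.getD x.toNat false then PySem.Set.update lr.1 (NB x) else lr.1,
               if mergeR.getD x.toNat false then PySem.Set.update lr.2 (NB x) else lr.2))
            (PySem.Set.ofList [(1 : Int)], PySem.Set.empty)).2.length : Nat) : Int)] := by
  rw [PySem.List.foldl_prod_mk
    (f := fun (s : PySem.Set Int) (x : Int) =>
      if mergeL.getD x.toNat false then PySem.Set.update s (NB x) else s)
    (g := fun (s : PySem.Set Int) (x : Int) =>
      if mergeR.getD x.toNat false then PySem.Set.update s (NB x) else s)]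
  have hbijL : ∀ z : Int,
      (∃ x ∈ PySem.List.pyRange 0 (n : Int) 1, (mergeL.getD x.toNat false) = true ∧ z ∈ NB x)
        ↔ (∃ y, y < n ∧ mergeL.getD y false = true ∧ z ∈ ZA y) := by
    intro z
    constructor
    · rintro ⟨x, hx, hf, hz⟩
      rw [PySem.List.mem_pyRange_one] at hx
      refine ⟨x.toNat, by omega, hf, ?_⟩
      exact (hrowIff x.toNat (by omega) z).mpr
        (by rwa [show ((x.toNat : Nat) : Int) = x from by omega])
    · rintro ⟨y, hy, hf, hz⟩
      refine ⟨(y : Int), ?_, by simpa using hf, (hrowIff y hy z).mp hz⟩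
      rw [PySem.List.mem_pyRange_one]
      constructor
      · exact Int.natCast_nonneg y
      · exact_mod_cast hy
  have hbijR : ∀ z : Int,
      (∃ x ∈ PySem.List.pyRange 0 (n : Int) 1, (mergeR.getD x.toNat false) = true ∧ z ∈ NB x)
        ↔ (∃ y, y < n ∧ mergeR.getD y false = true ∧ z ∈ ZA y) := by
    intro z
    constructor
    · rintro ⟨x, hx, hf, hz⟩
      rw [PySem.List.mem_pyRange_one] at hx
      refine ⟨x.toNat, by omega, hf, ?_⟩
      exact (hrowIff x.toNat (by omega) z).mpr
        (by rwa [show ((x.toNat : Nat) : Int) = x from by omega])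
    · rintro ⟨y, hy, hf, hz⟩
      refine ⟨(y : Int), ?_, by simpa using hf, (hrowIff y hy z).mp hz⟩
      rw [PySem.List.mem_pyRange_one]
      constructor
      · exact Int.natCast_nonneg y
      · exact_mod_cast hy
  have hempty : ∀ t : Int, t ∈ (PySem.Set.empty : PySem.Set Int) ↔ False := by
    simp [PySem.Set.empty]
  have h1 : (PySem.Set.ofList a.1).length
      = ((PySem.List.pyRange 0 (n : Int) 1).foldl
          (fun (s : PySem.Set Int) (x : Int) =>
            if mergeL.getD x.toNat false then PySem.Set.update s (NB x) else s)
          (PySem.Set.ofList [(1 : Int)])).length := by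
    refine ofList_length_eq (fun t => ?_)
      (nodup_foldl_update_flag _ _ _ _ (PySem.Set.nodup_ofList _))
    rw [mem_foldl_update_flag, PySem.Set.mem_ofList, List.mem_singleton, hbijL t, HML t]
  have h2 : (PySem.Set.ofList a.2).length
      = ((PySem.List.pyRange 0 (n : Int) 1).foldl
          (fun (s : PySem.Set Int) (x : Int) =>
            if mergeR.getD x.toNat false then PySem.Set.update s (NB x) else s)
          (PySem.Set.empty : PySem.Set Int)).length := by
    refine ofList_length_eq (fun t => ?_)
      (nodup_foldl_update_flag _ _ _ _ (by simp [PySem.Set.empty]))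
    rw [mem_foldl_update_flag, hempty t, hbijR t, HMR t]
    tauto
  rw [h1, h2]

-- ===== VERDICT (by name: the statement is the Claim_ definition above) =====
set_option maxHeartbeats 2000000 in
theorem tamanos_spec : Claim_equal_tamanos := by
  intro C _
  unfold Spec_tamanos
  cases C with
  | nil => rfl
  | cons c0 rest =>
    simp only [tamanos, tamanos_alt]
    rw [if_neg (show ¬((c0 :: rest).isEmpty = true) by simp)]
    rw [foldl_set_range (zrow (c0 :: rest)) (c0 :: rest).length
      (List.replicate (c0 :: rest).length []) (by simp)]
    rw [show (List.replicate (c0 :: rest).length ([] : List Int)).drop (c0 :: rest).length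
      = [] from by simp]
    rw [List.append_nil, List.range_eq_range']
    -- names for the pieces of B
    have hlim : (1 : Int) ≤ (if 0 < (PySem.List.max? (c0 :: rest) (fun y => y)).getD 0
        then 2 * (PySem.List.max? (c0 :: rest) (fun y => y)).getD 0 else 1) := by
      split <;> omega
    have hmax : ∀ y ∈ (c0 :: rest), y ≤ (PySem.List.max? (c0 :: rest) (fun y => y)).getD 0 := by
      cases hM : PySem.List.max? (c0 :: rest) (fun y => y) with
      | none => exact absurd ((PySem.List.max?_eq_none_iff _ _).mp hM) (by simp)
      | some m =>
        intro y hy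
        have h := PySem.List.max?_isMax hM y hy
        simpa using h
    have hsum : ∀ v ∈ (c0 :: rest), ∀ w ∈ (c0 :: rest),
        v + w ≤ (if 0 < (PySem.List.max? (c0 :: rest) (fun y => y)).getD 0
          then 2 * (PySem.List.max? (c0 :: rest) (fun y => y)).getD 0 else 1) := by
      intro v hv w hw
      have h1 := hmax v hv
      have h2 := hmax w hw
      split <;> omega
    have hisp : ∀ v ∈ (c0 :: rest), ∀ w ∈ (c0 :: rest),
        ispB (primeTable ((Nat.sqrt (if 0 < (PySem.List.max? (c0 :: rest) (fun y => y)).getD 0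
            then 2 * (PySem.List.max? (c0 :: rest) (fun y => y)).getD 0 else 1).toNat : Int)))
          (v + w) = es_primo (v + w) :=
      fun v hv w hw => ispB_eq _ hlim (v + w) (hsum v hv w hw)
    have hvalsmem : ∀ a : Int,
        a ∈ PySem.List.sorted (PySem.Set.ofList (c0 :: rest)) (fun x => x) false
          ↔ a ∈ (c0 :: rest) := by
      intro a
      rw [PySem.List.mem_sorted, PySem.Set.mem_ofList]
    have hvalsnodup : (PySem.List.sorted (PySem.Set.ofList (c0 :: rest)) (fun x => x) false).Nodup :=
      ((PySem.List.sorted_perm _ _ _).nodup_iff).mpr (PySem.Set.nodup_ofList _)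
    have hrepf : ∀ (m t : Nat), (List.replicate m false).getD t false = false := by
      intro m t
      rw [List.getD_eq_getElem?_getD, List.getElem?_replicate]
      split <;> rfl
    -- row equivalence between A's Z and B's nb
    have hrow : ∀ x : Nat, x < (c0 :: rest).length →
        (∀ t : Int, t ∈ ((List.range' 0 (c0 :: rest).length).map (zrow (c0 :: rest))).getD x []
          ↔ t ∈ ((PySem.List.sorted (PySem.Set.ofList (c0 :: rest)) (fun x => x) false).foldl
              (fun d v => d.insert v
                ((PySem.List.sorted (PySem.Set.ofList (c0 :: rest)) (fun x => x) false).filter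
                  (fun w => w != v && ispB (primeTable ((Nat.sqrt
                    (if 0 < (PySem.List.max? (c0 :: rest) (fun y => y)).getD 0
                     then 2 * (PySem.List.max? (c0 :: rest) (fun y => y)).getD 0
                     else 1).toNat : Int))) (v + w))))
              PySem.Dict.empty).getD (PySem.List.pyGetD (c0 :: rest) (x : Int) 0) []) ∧
        (((PySem.List.sorted (PySem.Set.ofList (c0 :: rest)) (fun x => x) false).foldl
              (fun d v => d.insert v
                ((PySem.List.sorted (PySem.Set.ofList (c0 :: rest)) (fun x => x) false).filter
                  (fun w => w != v && ispB (primeTable ((Nat.sqrt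
                    (if 0 < (PySem.List.max? (c0 :: rest) (fun y => y)).getD 0
                     then 2 * (PySem.List.max? (c0 :: rest) (fun y => y)).getD 0
                     else 1).toNat : Int))) (v + w))))
              PySem.Dict.empty).getD (PySem.List.pyGetD (c0 :: rest) (x : Int) 0) []).Nodup := by
      intro x hx
      have hZ : ((List.range' 0 (c0 :: rest).length).map (zrow (c0 :: rest))).getD x []
          = zrow (c0 :: rest) x := by
        rw [List.getD_eq_getElem _ _ (by simpa using hx)]
        simp
      have hpg : PySem.List.pyGetD (c0 :: rest) (x : Int) 0 = (c0 :: rest).getD x 0 :=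
        PySem.List.pyGetD_natCast _ _ _
      have hvmem : (c0 :: rest).getD x 0 ∈ (c0 :: rest) := by
        rw [List.getD_eq_getElem _ _ hx]
        exact List.getElem_mem hx
      have hnb := getD_fold_mem
        (fun v => ((PySem.List.sorted (PySem.Set.ofList (c0 :: rest)) (fun x => x) false).filter
          (fun w => w != v && ispB (primeTable ((Nat.sqrt
            (if 0 < (PySem.List.max? (c0 :: rest) (fun y => y)).getD 0
             then 2 * (PySem.List.max? (c0 :: rest) (fun y => y)).getD 0
             else 1).toNat : Int))) (v + w))))
        (PySem.List.sorted (PySem.Set.ofList (c0 :: rest)) (fun x => x) false)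
        PySem.Dict.empty ((c0 :: rest).getD x 0) ((hvalsmem _).mpr hvmem)
      constructor
      · intro t
        rw [hZ, hpg, hnb, mem_zrow, List.mem_filter, hvalsmem]
        constructor
        · rintro ⟨ht, hne, hp⟩
          refine ⟨ht, ?_⟩
          rw [Bool.and_eq_true, bne_iff_ne]
          exact ⟨hne, by rw [hisp _ hvmem _ ht]; exact hp⟩
        · rintro ⟨ht, hb⟩
          rw [Bool.and_eq_true, bne_iff_ne] at hb
          exact ⟨ht, hb.1, by rw [← hisp _ hvmem _ ht]; exact hb.2⟩
      · rw [hpg, hnb]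
        exact hvalsnodup.filter _
    -- the initial states after A's x = 0 iteration match
    have hinit : PRel
        (fun x => ((List.range' 0 (c0 :: rest).length).map (zrow (c0 :: rest))).getD x [])
        (c0 :: rest).length
        ([(1 : Int)], ((List.range' 0 (c0 :: rest).length).map (zrow (c0 :: rest))).getD 0 [])
        (List.replicate ((c0 :: rest).length + 2) false,
         markTable ((c0 :: rest).length : Int) (List.replicate ((c0 :: rest).length + 2) false)
           (((PySem.List.sorted (PySem.Set.ofList (c0 :: rest)) (fun x => x) false).foldl
              (fun d v => d.insert v
                ((PySem.List.sorted (PySem.Set.ofList (c0 :: rest)) (fun x => x) false).filter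
                  (fun w => w != v && ispB (primeTable ((Nat.sqrt
                    (if 0 < (PySem.List.max? (c0 :: rest) (fun y => y)).getD 0
                     then 2 * (PySem.List.max? (c0 :: rest) (fun y => y)).getD 0
                     else 1).toNat : Int))) (v + w))))
              PySem.Dict.empty).getD (PySem.List.pyGetD (c0 :: rest) (0 : Int) 0) []),
         List.replicate (c0 :: rest).length false,
         (List.replicate (c0 :: rest).length false).set 0 true) := by
      have hrow0 := hrow 0 (by simp)
      refine ⟨by simp, by rw [length_markTable]; simp, by simp, by rw [List.length_set]; simp,
        ?_, ?_, ?_, ?_⟩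
      · intro t ht2 htn
        rw [hrepf]
        constructor
        · intro h; exact absurd h (by simp)
        · intro h
          rw [List.mem_singleton] at h
          omega
      · intro t ht2 htn
        have hrow0' := (hrow 0 (by simp)).1
        rw [Nat.cast_zero] at hrow0'
        rw [getD_markTable _ _ _ t ht2 (by exact_mod_cast htn)
          (by rw [List.length_replicate]; omega), hrepf, Bool.false_or, any_beq_iff_mem]
        exact (hrow0' (t : Int)).symm
      · intro z
        constructor
        · intro h
          exact Or.inl (List.mem_singleton.mp h)
        · rintro (rfl | ⟨y, hy, hget, -⟩)
          · exact List.mem_singleton.mpr rfl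
          · rw [hrepf] at hget
            exact absurd hget (by simp)
      · intro z
        constructor
        · intro h
          refine ⟨0, by simp, ?_, h⟩
          rw [getD_set_flag _ _ _ (by simp)]
          simp
        · rintro ⟨y, hy, hget, hz⟩
          rcases Nat.eq_zero_or_pos y with rfl | hpos
          · exact hz
          · rw [getD_set_flag _ _ _ (by simpa using hy), hrepf] at hget
            rw [decide_eq_false (by omega), Bool.false_or] at hget
            exact absurd hget (by simp)
    obtain ⟨-, -, -, -, -, -, MLf, MRf⟩ :=
      loop_rel2
        (fun x => ((List.range' 0 (c0 :: rest).length).map (zrow (c0 :: rest))).getD x [])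
        (fun x => ((PySem.List.sorted (PySem.Set.ofList (c0 :: rest)) (fun x => x) false).foldl
              (fun d v => d.insert v
                ((PySem.List.sorted (PySem.Set.ofList (c0 :: rest)) (fun x => x) false).filter
                  (fun w => w != v && ispB (primeTable ((Nat.sqrt
                    (if 0 < (PySem.List.max? (c0 :: rest) (fun y => y)).getD 0
                     then 2 * (PySem.List.max? (c0 :: rest) (fun y => y)).getD 0
                     else 1).toNat : Int))) (v + w))))
              PySem.Dict.empty).getD (PySem.List.pyGetD (c0 :: rest) x 0) [])
        ((c0 :: rest).length : Int) (c0 :: rest).length rfl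
        (fun x hx => ⟨(hrow x hx).1, (hrow x hx).2⟩)
        rest.length 1 ((c0 :: rest).length : Int) (by omega) (by simp only [List.length_cons]; omega)
        (by push_cast [List.length_cons]; ring)
        ([(1 : Int)], ((List.range' 0 (c0 :: rest).length).map (zrow (c0 :: rest))).getD 0 [])
        (List.replicate ((c0 :: rest).length + 2) false,
         markTable ((c0 :: rest).length : Int) (List.replicate ((c0 :: rest).length + 2) false)
           (((PySem.List.sorted (PySem.Set.ofList (c0 :: rest)) (fun x => x) false).foldl
              (fun d v => d.insert v
                ((PySem.List.sorted (PySem.Set.ofList (c0 :: rest)) (fun x => x) false).filter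
                  (fun w => w != v && ispB (primeTable ((Nat.sqrt
                    (if 0 < (PySem.List.max? (c0 :: rest) (fun y => y)).getD 0
                     then 2 * (PySem.List.max? (c0 :: rest) (fun y => y)).getD 0
                     else 1).toNat : Int))) (v + w))))
              PySem.Dict.empty).getD (PySem.List.pyGetD (c0 :: rest) (0 : Int) 0) []),
         List.replicate (c0 :: rest).length false,
         (List.replicate (c0 :: rest).length false).set 0 true)
        hinit
    exact final_eq
      (fun x => ((List.range' 0 (c0 :: rest).length).map (zrow (c0 :: rest))).getD x [])
      (fun x => ((PySem.List.sorted (PySem.Set.ofList (c0 :: rest)) (fun x => x) false).foldl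
            (fun d v => d.insert v
              ((PySem.List.sorted (PySem.Set.ofList (c0 :: rest)) (fun x => x) false).filter
                (fun w => w != v && ispB (primeTable ((Nat.sqrt
                  (if 0 < (PySem.List.max? (c0 :: rest) (fun y => y)).getD 0
                   then 2 * (PySem.List.max? (c0 :: rest) (fun y => y)).getD 0
                   else 1).toNat : Int))) (v + w))))
            PySem.Dict.empty).getD (PySem.List.pyGetD (c0 :: rest) x 0) [])
      (c0 :: rest).length
      (fun x hx => (hrow x hx).1)
      _ _ _ MLf MRf
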